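-- pv_equiv track=rewrite | github.com/mroley1/fizzBuzzDonePoorly | polynomialGenerator.py | poly_simp
-- ===== SOURCE A (Python) =====
-- def poly_simp(lag_poly):
--     out = [1]
--     for val in range(1, len(lag_poly)):
--         val = lag_poly[val]
--         for i in range(len(out)):
--             if i == len(out)-1:
--                 out[i] = val*out[i]
--             else:
--                 out[i] = val*out[i]+out[i+1]
--         out.insert(0,1)
--     return out
-- ===== SOURCE B (Python) =====
-- def _add(p, q):
--     # pointwise sum of ascending coefficient lists (shorter padded with zeros)
--     n = max(len(p), len(q))
--     return [(p[i] if i < len(p) else 0) + (q[i] if i < len(q) else 0) for i in range(n)]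
--
-- def _mul(p, q):
--     # product of ascending coefficient lists
--     if not p:
--         return []
--     return _add([p[0] * b for b in q], [0] + _mul(p[1:], q))
--
-- def _prod(vals):
--     # ascending coefficients of prod((x + v) for v in vals), by a balanced product tree
--     if not vals:
--         return [1]
--     if len(vals) == 1:
--         return [vals[0], 1]
--     mid = len(vals) // 2
--     return _mul(_prod(vals[:mid]), _prod(vals[mid:]))
--
-- def poly_simp(lag_poly):
--     return list(reversed(_prod(lag_poly[1:])))
-- ===== Notes on version B (the rewrite author's own statement) =====
-- stated objective: alternative
-- what changed: B replaces A's in-place left-to-right incremental multiplication by each linear factor with a balanced product tree: it recursively splits the factor list in half, builds each half's polynomial, and combines them with a recursive polynomial convolution (ascending order, reversed at the end).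
import Mathlib
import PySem

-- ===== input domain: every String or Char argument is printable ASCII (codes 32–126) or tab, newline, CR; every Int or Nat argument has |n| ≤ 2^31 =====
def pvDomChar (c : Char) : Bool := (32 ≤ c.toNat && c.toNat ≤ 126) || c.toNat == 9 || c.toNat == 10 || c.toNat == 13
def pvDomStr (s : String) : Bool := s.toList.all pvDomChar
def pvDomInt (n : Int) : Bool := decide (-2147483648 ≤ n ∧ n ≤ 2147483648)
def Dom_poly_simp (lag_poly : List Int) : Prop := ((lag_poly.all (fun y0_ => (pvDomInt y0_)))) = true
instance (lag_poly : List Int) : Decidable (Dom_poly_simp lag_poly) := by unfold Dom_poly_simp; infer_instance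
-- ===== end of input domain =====

-- B rebuilds the same coefficient list with a balanced product tree of linear factors
-- combined by recursive polynomial convolution, instead of A's in-place per-factor update loop (objective: alternative).


-- ===== PORT A =====
-- one pass of A's inner loop: 'for i in range(len(out)): out[i] = val*out[i] (+ out[i+1])'
def pvInnerStep (v : Int) (o : List Int) (i : Int) : List Int :=
  if i = PySem.List.len o - 1 then
    PySem.List.pySetD o i (v * PySem.List.pyGetD o i 0)
  else
    PySem.List.pySetD o i (v * PySem.List.pyGetD o i 0 + PySem.List.pyGetD o (i + 1) 0)

def poly_simp (lag_poly : List Int) : List Int :=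
  (PySem.List.pyRange 1 (PySem.List.len lag_poly) 1).foldl
    (fun out vi =>
      let v := PySem.List.pyGetD lag_poly vi 0
      let out2 := (PySem.List.pyRange 0 (PySem.List.len out) 1).foldl (pvInnerStep v) out
      PySem.List.insert out2 0 1)
    [1]

-- ===== PORT B =====
-- port of Source B's _add (pointwise sum of ascending coefficient lists, zero-padded)
def pvAdd (p q : List Int) : List Int :=
  (PySem.List.pyRange 0 (max (PySem.List.len p) (PySem.List.len q)) 1).map
    (fun i => (if i < PySem.List.len p then PySem.List.pyGetD p i 0 else 0)
            + (if i < PySem.List.len q then PySem.List.pyGetD q i 0 else 0))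

-- port of Source B's _mul (recursive polynomial convolution, ascending order)
def pvMul : List Int → List Int → List Int
  | [], _ => []
  | a :: p, q => pvAdd (q.map (fun b => a * b)) (0 :: pvMul p q)

-- port of Source B's _prod (balanced product tree over the factor values);
-- vals[:mid]/vals[mid:] with 0 ≤ mid ≤ len are exactly take/drop, len(vals)//2 on a Nat is Nat division
def pvProd (vals : List Int) : List Int :=
  if vals.length = 0 then [1]
  else if vals.length = 1 then [vals.headD 0, 1]
  else
    let mid := vals.length / 2
    pvMul (pvProd (vals.take mid)) (pvProd (vals.drop mid))
termination_by vals.length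
decreasing_by
  · simp [List.length_take]; omega
  · simp [List.length_drop]; omega

def poly_simp_alt (lag_poly : List Int) : List Int :=
  (pvProd (PySem.List.slice lag_poly (some 1) none)).reverse

-- ===== PRECONDITION & SPEC =====
def Spec_poly_simp (lag_poly : List Int) (out : List Int) : Prop := out = poly_simp_alt lag_poly
instance (lag_poly : List Int) (out : List Int) : Decidable (Spec_poly_simp lag_poly out) := by unfold Spec_poly_simp; infer_instance

-- ===== CLAIM (what is proved, stated in full; the proofs are below) =====
def Claim_equal_poly_simp : Prop := ∀ (lag_poly : List Int), Dom_poly_simp lag_poly → Spec_poly_simp lag_poly (poly_simp lag_poly)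

-- ===== LEMMAS AND PROOFS =====

-- closed form of A's inner loop
def pvG (v : Int) : List Int → List Int
  | [] => []
  | [a] => [v * a]
  | a :: b :: rs => (v * a + b) :: pvG v (b :: rs)

-- ascending-order evaluation of a coefficient list as an integer polynomial
noncomputable def pvP : List Int → Polynomial ℤ
  | [] => 0
  | c :: cs => Polynomial.C c + Polynomial.X * pvP cs

lemma pvG_length (v : Int) : ∀ q : List Int, (pvG v q).length = q.length := by
  intro q
  induction q with
  | nil => rfl
  | cons a t ih =>
    cases t with
    | nil => rfl
    | cons b rs => simpa [pvG] using ih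


lemma inner_spec (v : Int) : ∀ (suf done : List Int),
    (PySem.List.pyRange (done.length : Int) ((done.length : Int) + (suf.length : Int)) 1).foldl
      (pvInnerStep v) (done ++ suf) = done ++ pvG v suf := by
  intro suf
  induction suf with
  | nil =>
    intro done
    rw [PySem.List.pyRange_one_eq_nil (by simp)]
    simp [pvG]
  | cons a rest ih =>
    intro done
    rw [PySem.List.pyRange_one_cons (by simp)]
    simp only [List.foldl_cons]
    cases rest with
    | nil =>
      have hcond : (done.length : Int) = PySem.List.len (done ++ [a]) - 1 := by
        simp [PySem.List.len_eq]
      have happ : pvInnerStep v (done ++ [a]) (done.length : Int) = done ++ [v * a] := by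
        unfold pvInnerStep
        rw [if_pos hcond]
        rw [PySem.List.pyGetD_natCast, PySem.List.pySetD_natCast]
        rw [List.getD_append_right _ _ _ _ (le_refl _)]
        simp only [Nat.sub_self, List.getD_cons_zero]
        rw [List.set_append_right _ _ (le_refl _)]
        simp
      rw [happ]
      rw [PySem.List.pyRange_one_eq_nil (by simp)]
      simp [pvG]
    | cons b rs =>
      have hcond : ¬ ((done.length : Int) = PySem.List.len (done ++ a :: b :: rs) - 1) := by
        simp [PySem.List.len_eq]
        omega
      have h1 : ((done.length : Int) + 1) = ((done.length + 1 : Nat) : Int) := by simp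
      have happ : pvInnerStep v (done ++ a :: b :: rs) (done.length : Int)
          = (done ++ [v * a + b]) ++ b :: rs := by
        unfold pvInnerStep
        rw [if_neg hcond]
        rw [h1, PySem.List.pyGetD_natCast, PySem.List.pyGetD_natCast, PySem.List.pySetD_natCast]
        rw [List.getD_append_right _ _ _ _ (le_refl _)]
        rw [List.getD_append_right _ _ _ _ (by omega : done.length ≤ done.length + 1)]
        simp only [Nat.sub_self, List.getD_cons_zero]
        have h2 : done.length + 1 - done.length = 1 := by omega
        rw [h2]
        simp only [List.getD_cons_succ, List.getD_cons_zero]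
        rw [List.set_append_right _ _ (le_refl _)]
        simp
      rw [happ]
      have key := ih (done ++ [v * a + b])
      have hlen : ((done ++ [v * a + b]).length : Int) = (done.length : Int) + 1 := by
        simp
      rw [hlen] at key
      have hend : (done.length : Int) + 1 + ((b :: rs).length : Int)
          = (done.length : Int) + ((a :: b :: rs).length : Int) := by
        simp
        ring
      rw [hend] at key
      rw [key]
      simp [pvG]


lemma poly_simp_eq_fold (lag_poly : List Int) :
    poly_simp lag_poly = (lag_poly.drop 1).foldl (fun o v => 1 :: pvG v o) [1] := by
  unfold poly_simp
  have hinner : ∀ (v : Int) (out : List Int),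
      (PySem.List.pyRange 0 (PySem.List.len out) 1).foldl (pvInnerStep v) out = pvG v out := by
    intro v out
    have h := inner_spec v out []
    simpa [PySem.List.len_eq] using h
  have hfun : (fun (out : List Int) (vi : Int) =>
        let v := PySem.List.pyGetD lag_poly vi 0
        let out2 := (PySem.List.pyRange 0 (PySem.List.len out) 1).foldl (pvInnerStep v) out
        PySem.List.insert out2 0 1)
      = fun (out : List Int) (vi : Int) => 1 :: pvG (PySem.List.pyGetD lag_poly vi 0) out := by
    funext out vi
    simp only [hinner, PySem.List.insert_zero]
  rw [hfun]
  have h := PySem.List.foldl_pyRange_pyGetD lag_poly 0 (fun (o : List Int) (v : Int) => 1 :: pvG v o) [1] (by norm_num : (0:Int) ≤ 1)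
  simpa using h


-- recursive characterisation of the _add comprehension, used by the proofs only
def pvAddR : List Int → List Int → List Int
  | [], q => q
  | p, [] => p
  | a :: p, b :: q => (a + b) :: pvAddR p q

lemma pvP_pvAddR (p q : List Int) : pvP (pvAddR p q) = pvP p + pvP q := by
  induction p generalizing q with
  | nil => simp [pvAddR, pvP]
  | cons a p ih =>
    cases q with
    | nil => simp [pvAddR, pvP]
    | cons b q => simp [pvAddR, pvP, ih]; ring


lemma pvAddR_length (p q : List Int) : (pvAddR p q).length = max p.length q.length := by
  induction p generalizing q with
  | nil => simp [pvAddR]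
  | cons a p ih =>
    cases q with
    | nil => simp [pvAddR]
    | cons b q => simp [pvAddR, ih]

lemma pvAddR_getD (p : List Int) : ∀ (q : List Int) (i : Nat),
    (pvAddR p q).getD i 0 = p.getD i 0 + q.getD i 0 := by
  induction p with
  | nil => intro q i; simp [pvAddR]
  | cons a p ih =>
    intro q i
    cases q with
    | nil => simp [pvAddR]
    | cons b q =>
      cases i with
      | zero => simp [pvAddR]
      | succ j => simpa [pvAddR] using ih q j

lemma pvAdd_eq_rec (p q : List Int) : pvAdd p q = pvAddR p q := by
  apply List.ext_getElem
  · simp [pvAdd, PySem.List.length_pyRange_one, PySem.List.len_eq, pvAddR_length]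
    omega
  · intro i h1 h2
    have hi : i < max p.length q.length := by
      simpa [pvAdd, PySem.List.length_pyRange_one, PySem.List.len_eq] using h1
    rw [show (pvAddR p q)[i] = (pvAddR p q).getD i 0 from (List.getD_eq_getElem _ _ h2).symm]
    rw [pvAddR_getD]
    simp only [pvAdd, List.getElem_map, PySem.List.getElem_pyRange_one, PySem.List.len_eq,
      zero_add, PySem.List.pyGetD_natCast]
    have hp : ((i : Int) < (p.length : Int)) ↔ i < p.length := by exact_mod_cast Iff.rfl
    have hq : ((i : Int) < (q.length : Int)) ↔ i < q.length := by exact_mod_cast Iff.rfl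
    by_cases c1 : i < p.length <;> by_cases c2 : i < q.length
    · simp [hp, hq, c1, c2]
    · simp [hp, hq, c1, c2]
    · simp [hp, hq, c1, c2]
    · omega


lemma pvP_map_mul (a : Int) (q : List Int) :
    pvP (q.map (fun b => a * b)) = Polynomial.C a * pvP q := by
  induction q with
  | nil => simp [pvP]
  | cons b q ih => simp [pvP, ih]; ring


lemma pvP_pvMul (p q : List Int) : pvP (pvMul p q) = pvP p * pvP q := by
  induction p generalizing q with
  | nil => simp [pvMul, pvP]
  | cons a p ih =>
    simp [pvMul, pvP, pvAdd_eq_rec, pvP_pvAddR, pvP_map_mul, ih]; ring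


lemma pvMul_length (p q : List Int) (hp : p ≠ []) (hq : q ≠ []) :
    (pvMul p q).length = p.length + q.length - 1 := by
  induction p generalizing q with
  | nil => exact absurd rfl hp
  | cons a p ih =>
    cases p with
    | nil =>
      have hq1 : 1 ≤ q.length := List.length_pos_iff.mpr hq
      simp [pvMul, pvAdd_eq_rec, pvAddR_length]; omega
    | cons c p' =>
      have := @ih q (by simp) hq
      have hq1 : 1 ≤ q.length := List.length_pos_iff.mpr hq
      simp only [pvMul, pvAdd_eq_rec, pvAddR_length, List.length_map, List.length_cons] at *
      omega


lemma pvProd_length (vals : List Int) : (pvProd vals).length = vals.length + 1 := by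
  induction vals using pvProd.induct with
  | case1 vals h0 => rw [pvProd]; simp [h0]
  | case2 vals h0 h1 => rw [pvProd]; simp [h1]
  | case3 vals h0 h1 mid ih1 ih2 =>
    rw [pvProd]
    simp only [h0, h1, if_false]
    have t1 : (pvProd (vals.take mid)) ≠ [] := by
      intro h; rw [h] at ih1; simp at ih1
    have t2 : (pvProd (vals.drop mid)) ≠ [] := by
      intro h; rw [h] at ih2; simp at ih2
    rw [pvMul_length _ _ t1 t2, ih1, ih2]
    simp [mid, List.length_take, List.length_drop]
    omega


lemma pvP_pvProd (vals : List Int) :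
    pvP (pvProd vals) = (vals.map (fun v => Polynomial.C v + Polynomial.X)).prod := by
  induction vals using pvProd.induct with
  | case1 vals h0 =>
    have : vals = [] := List.eq_nil_of_length_eq_zero h0
    subst this
    simp [pvProd, pvP]
  | case2 vals h0 h1 =>
    match vals, h1 with
    | [a], _ => rw [pvProd]; simp [pvP]
  | case3 vals h0 h1 mid ih1 ih2 =>
    rw [pvProd]
    simp only [h0, h1, if_false]
    rw [pvP_pvMul, ih1, ih2]
    rw [← List.prod_append, ← List.map_append, List.take_append_drop]


lemma pvP_append (xs ys : List Int) :
    pvP (xs ++ ys) = pvP xs + Polynomial.X ^ xs.length * pvP ys := by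
  induction xs with
  | nil => simp [pvP]
  | cons c cs ih => simp [pvP, ih, pow_succ]; ring


lemma pvP_rev_cons (c : Int) (cs : List Int) :
    pvP (c :: cs).reverse = Polynomial.C c * Polynomial.X ^ cs.length + pvP cs.reverse := by
  rw [List.reverse_cons, pvP_append]
  simp [pvP]
  ring


lemma pvP_rev_pvG (v : Int) : ∀ q : List Int, q ≠ [] →
    pvP (pvG v q).reverse
      = (Polynomial.C v + Polynomial.X) * pvP q.reverse - Polynomial.C (q.headD 0) * Polynomial.X ^ q.length := by
  intro q
  induction q with
  | nil => intro h; exact absurd rfl h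
  | cons a t ih =>
    intro _
    cases t with
    | nil =>
      simp [pvG, pvP, map_mul]
      ring
    | cons b rs =>
      have IH := ih (by simp)
      show pvP (pvG v (a :: b :: rs)).reverse = _
      rw [pvG, pvP_rev_cons, pvG_length, IH, pvP_rev_cons a (b :: rs), pvP_rev_cons b rs]
      simp only [List.length_cons, List.headD_cons, map_add, map_mul]
      ring


lemma foldA_inv (vals : List Int) : ∀ acc : List Int, acc ≠ [] → acc.headD 0 = 1 →
    (vals.foldl (fun o v => 1 :: pvG v o) acc) ≠ [] ∧
    (vals.foldl (fun o v => 1 :: pvG v o) acc).headD 0 = 1 ∧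
    (vals.foldl (fun o v => 1 :: pvG v o) acc).length = acc.length + vals.length ∧
    pvP (vals.foldl (fun o v => 1 :: pvG v o) acc).reverse
      = pvP acc.reverse * (vals.map (fun v => Polynomial.C v + Polynomial.X)).prod := by
  induction vals with
  | nil =>
    intro acc h1 h2
    refine ⟨h1, h2, by simp, by simp⟩
  | cons v vs ih =>
    intro acc h1 h2
    have hstep : pvP (1 :: pvG v acc).reverse
        = (Polynomial.C v + Polynomial.X) * pvP acc.reverse := by
      rw [pvP_rev_cons, pvG_length, pvP_rev_pvG v acc h1, h2]
      simp
    obtain ⟨r1, r2, r3, r4⟩ := ih (1 :: pvG v acc) (by simp) (by simp)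
    refine ⟨r1, r2, ?_, ?_⟩
    · simp only [List.foldl_cons]
      rw [r3]
      simp [pvG_length]
      omega
    · simp only [List.foldl_cons, List.map_cons, List.prod_cons]
      rw [r4, hstep]
      ring


lemma pvP_inj : ∀ p q : List Int, p.length = q.length → pvP p = pvP q → p = q := by
  intro p
  induction p with
  | nil =>
    intro q h _
    exact (List.eq_nil_of_length_eq_zero h.symm).symm ▸ rfl
  | cons a p ih =>
    intro q hlen heq
    cases q with
    | nil => simp at hlen
    | cons b q' =>
      have hc0 : a = b := by
        have := congrArg (fun r => Polynomial.coeff r 0) heq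
        simpa [pvP, Polynomial.mul_coeff_zero] using this
      have htail : pvP p = pvP q' := by
        have h2 : Polynomial.X * pvP p = Polynomial.X * pvP q' := by
          have h3 := heq
          simp only [pvP, hc0] at h3
          exact add_left_cancel h3
        exact mul_left_cancel₀ Polynomial.X_ne_zero h2
      have := ih q' (by simpa using hlen) htail
      rw [hc0, this]


-- ===== VERDICT (by name: the statement is the Claim_ definition above) =====
theorem poly_simp_spec : Claim_equal_poly_simp := by
  intro lag_poly _
  unfold Spec_poly_simp poly_simp_alt
  rw [PySem.List.slice_from_one]
  rw [poly_simp_eq_fold]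
  have htail : lag_poly.drop 1 = lag_poly.tail := List.drop_one
  rw [htail]
  set vals := lag_poly.tail with hv
  obtain ⟨r1, r2, r3, r4⟩ := foldA_inv vals [1] (by simp) (by simp)
  set r := vals.foldl (fun o v => 1 :: pvG v o) [1] with hr
  have hPr : pvP r.reverse = (vals.map (fun v => Polynomial.C v + Polynomial.X)).prod := by
    rw [r4]
    simp [pvP]
  have hPb : pvP (pvProd vals) = (vals.map (fun v => Polynomial.C v + Polynomial.X)).prod :=
    pvP_pvProd vals
  have hlen : r.reverse.length = (pvProd vals).length := by
    rw [List.length_reverse, r3, pvProd_length]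
    simp only [List.length_cons, List.length_nil]
    omega
  have heq : r.reverse = pvProd vals := pvP_inj _ _ hlen (hPr.trans hPb.symm)
  calc r = r.reverse.reverse := (List.reverse_reverse r).symm
    _ = (pvProd vals).reverse := by rw [heq]
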